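-- pv_equiv track=rewrite | github.com/da91love/trend_finder | src/util/CollectionUtil.py | sum_by
-- ===== SOURCE A (Python) =====
-- def sum_by(collection, num):
--     try:
--         result = []
--         sum = 0
--         for idx,col in enumerate(collection):
--             if (idx + 1) % num != 0:
--                 sum += col
--             else:
--                 sum += col
--                 result.append(sum)
--                 sum = 0
--
--         return result
--     except Exception as e:
--         raise e
-- ===== SOURCE B (Python) =====
-- def sum_by(collection, num):
--     xs = list(collection)
--     if num <= 0:
--         return []
--     return [sum(xs[i:i + num]) for i in range(0, len(xs) - num + 1, num)]
-- ===== Notes on version B (the rewrite author's own statement) =====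
-- stated objective: faster
-- what changed: Replaces the per-element accumulator loop with its modulo test by a comprehension that sums contiguous slices xs[i:i+num] over chunk start indices.
-- outside the precondition, e.g. on sum_by([1, 2, 3, 4], -2): A returns [3, 7], B returns []; on sum_by([1], 0): A raises ZeroDivisionError, B returns []
import Mathlib
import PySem

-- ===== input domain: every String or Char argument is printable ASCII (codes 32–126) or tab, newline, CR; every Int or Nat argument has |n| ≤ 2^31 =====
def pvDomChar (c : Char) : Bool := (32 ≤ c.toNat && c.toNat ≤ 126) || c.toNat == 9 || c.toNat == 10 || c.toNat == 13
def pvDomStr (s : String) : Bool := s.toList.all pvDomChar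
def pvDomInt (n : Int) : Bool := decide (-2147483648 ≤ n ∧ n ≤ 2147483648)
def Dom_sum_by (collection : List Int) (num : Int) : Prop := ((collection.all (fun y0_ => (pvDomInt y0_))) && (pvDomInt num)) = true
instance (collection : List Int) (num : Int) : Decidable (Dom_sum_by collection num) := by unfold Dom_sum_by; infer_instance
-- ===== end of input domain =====

-- B replaces A's per-element accumulator loop (with its modulo test) by a slice
-- comprehension over chunk start indices; equivalence is proved for num ≥ 1 (or an
-- empty collection).

-- ===== PORT A =====
-- literal port of A's enumerate loop with a running sum and a modulo test
def sum_by (collection : List Int) (num : Int) : List Int :=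
  (((PySem.List.enumerate collection 0).foldl
      (fun (st : List Int × Int) (p : Int × Int) =>
        if PySem.Int.mod (p.1 + 1) num ≠ 0 then (st.1, st.2 + p.2)
        else (st.1 ++ [st.2 + p.2], 0))
      ([], 0)).1)

-- ===== PORT B =====
-- slice-comprehension chunker: sums xs[i:i+num] for i = 0, num, 2*num, …
def sum_by_alt (collection : List Int) (num : Int) : List Int :=
  if num ≤ 0 then []
  else (PySem.List.pyRange 0 ((collection.length : Int) - num + 1) num).map
        (fun i => (PySem.List.slice collection (some i) (some (i + num))).sum)

-- ===== PRECONDITION & SPEC =====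
-- Pre_ restricts to the natural domain num ≥ 1 (plus the trivially empty collection):
-- on num == 0 with a non-empty collection A raises ZeroDivisionError, and a negative
-- group size is outside the task's natural domain (A's modulo there happens to group
-- by |num|, an artefact of Python's divisor-sign modulo, while B yields no groups).
def Pre_sum_by (collection : List Int) (num : Int) : Prop :=
  1 ≤ num ∨ collection = []
instance (collection : List Int) (num : Int) : Decidable (Pre_sum_by collection num) := by
  unfold Pre_sum_by; infer_instance

def pvWitness_sum_by : List Int × Int := ([1, 2, 3, 4, 5], 2)

def Spec_sum_by (collection : List Int) (num : Int) (out : List Int) : Prop :=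
  out = sum_by_alt collection num
instance (collection : List Int) (num : Int) (out : List Int) : Decidable (Spec_sum_by collection num out) := by
  unfold Spec_sum_by; infer_instance

-- ===== CLAIM (what is proved, stated in full; the proofs are below) =====
def Claim_equal_sum_by : Prop := ∀ (collection : List Int) (num : Int),
  Dom_sum_by collection num → Pre_sum_by collection num →
  Spec_sum_by collection num (sum_by collection num)

-- ===== LEMMAS AND PROOFS =====

-- proof-only recursive chunker bridging A's loop and B's slice comprehension
def pvChunkSums (n : Nat) (xs : List Int) : List Int :=
  if h : n = 0 ∨ xs.length < n then [] else (xs.take n).sum :: pvChunkSums n (xs.drop n)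
  termination_by xs.length
  decreasing_by
    simp only [not_or, not_lt] at h
    simp only [List.length_drop]
    omega

-- proof-only recursive model of A's loop: c = remaining capacity of the current chunk,
-- s = the running partial sum
def pvF (n : Nat) : Nat → Int → List Int → List Int
  | _, _, [] => []
  | c, s, x :: xs => if c = 1 then (s + x) :: pvF n n 0 xs else pvF n (c - 1) (s + x) xs

theorem pvF_split (n : Nat) :
    ∀ (xs : List Int) (c : Nat) (s : Int), 1 ≤ c →
      pvF n c s xs =
        if xs.length < c then []
        else (s + (xs.take c).sum) :: pvF n n 0 (xs.drop c) := by
  intro xs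
  induction xs with
  | nil => intro c s hc; simp [pvF]; omega
  | cons x xs ih =>
    intro c s hc
    by_cases h1 : c = 1
    · subst h1; simp [pvF]
    · have hc2 : 2 ≤ c := by omega
      have := ih (c - 1) (s + x) (by omega)
      simp only [pvF, if_neg h1, this]
      have hlen : (x :: xs).length < c ↔ xs.length < c - 1 := by simp; omega
      by_cases hlt : xs.length < c - 1
      · rw [if_pos hlt, if_pos (hlen.mpr hlt)]
      · rw [if_neg hlt, if_neg (fun hh => hlt (hlen.mp hh))]
        have htake : (x :: xs).take c = x :: xs.take (c - 1) := by
          cases c with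
          | zero => omega
          | succ m => simp
        have hdrop : (x :: xs).drop c = xs.drop (c - 1) := by
          cases c with
          | zero => omega
          | succ m => simp
        rw [htake, hdrop]
        simp [List.sum_cons]
        ring_nf

theorem pvF_eq_chunkSums (n : Nat) (hn : 0 < n) (xs : List Int) :
    pvF n n 0 xs = pvChunkSums n xs := by
  have key : ∀ (m : Nat) (ys : List Int), ys.length ≤ m → pvF n n 0 ys = pvChunkSums n ys := by
    intro m
    induction m with
    | zero =>
      intro ys hy
      have : ys = [] := List.eq_nil_of_length_eq_zero (by omega)
      subst this
      rw [pvChunkSums, dif_pos (Or.inr (by simpa using hn))]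
      simp [pvF]
    | succ m ih =>
      intro ys hy
      rw [pvF_split n ys n 0 hn, pvChunkSums]
      by_cases hlt : ys.length < n
      · rw [if_pos hlt, dif_pos (Or.inr hlt)]
      · have hne : ¬ (n = 0 ∨ ys.length < n) := by omega
        rw [if_neg hlt, dif_neg hne]
        have := ih (ys.drop n) (by simp [List.length_drop]; omega)
        rw [this]
        simp
  exact key xs.length xs le_rfl

-- the fold of A's loop body equals pvF, tracking the invariant mod j num = num - c
theorem foldA_eq_pvF (num : Int) (h1 : 1 ≤ num) :
    ∀ (xs : List Int) (c : Nat) (j : Int) (acc : List Int) (s : Int),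
      1 ≤ c → (c : Int) ≤ num → j % num = num - c →
      ((PySem.List.enumerate xs j).foldl
          (fun (st : List Int × Int) (p : Int × Int) =>
            if PySem.Int.mod (p.1 + 1) num ≠ 0 then (st.1, st.2 + p.2)
            else (st.1 ++ [st.2 + p.2], 0))
          (acc, s)).1 = acc ++ pvF num.toNat c s xs := by
  intro xs
  induction xs with
  | nil => intro c j acc s _ _ _; simp [PySem.List.enumerate, pvF]
  | cons x xs ih =>
    intro c j acc s hc1 hcn hmod
    have hpos : (0:Int) < num := by omega
    rw [PySem.List.enumerate_cons, List.foldl_cons]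
    have hmodP : PySem.Int.mod (j + 1) num = (j + 1) % num :=
      PySem.Int.mod_eq_emod_of_pos hpos
    have hstep : (j + 1) % num = (num - c + 1) % num := by
      rw [show j + 1 = (j % num + 1) + num * (j / num) by
            have := Int.emod_add_ediv j num; linarith,
          Int.add_mul_emod_self_left, hmod]
    by_cases hce : c = 1
    · -- chunk closes: (j+1) % num = 0
      subst hce
      have hz : (j + 1) % num = 0 := by
        have hnum : num - (1:Nat) + 1 = num := by push_cast; ring
        rw [hstep, hnum, Int.emod_self]
      simp only [hmodP, hz, ne_eq, not_true_eq_false, if_false, ite_false]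
      have hnext : (j + 1) % num = num - (num.toNat : Int) := by
        rw [hz]; simp [Int.toNat_of_nonneg (by omega : (0:Int) ≤ num)]
      have := ih num.toNat (j + 1) (acc ++ [s + x]) 0
        (by omega) (by simp [Int.toNat_of_nonneg (by omega : (0:Int) ≤ num)]) hnext
      rw [show ((acc, s).1 ++ [(acc, s).2 + x], (0:Int)) = (acc ++ [s + x], (0:Int)) from rfl,
        this]
      simp [pvF]
    · -- chunk continues: (j+1) % num = num - (c-1) ≠ 0
      have hc2 : 2 ≤ c := by omega
      have hval : (j + 1) % num = num - (c - 1 : Nat) := by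
        rw [hstep, Int.emod_eq_of_lt (by push_cast; omega) (by push_cast; omega)]
        push_cast; omega
      have hnz : (j + 1) % num ≠ 0 := by rw [hval]; push_cast; omega
      simp only [hmodP, hnz, ne_eq, not_false_eq_true, if_true, ite_true]
      have := ih (c - 1) (j + 1) acc (s + x) (by omega) (by push_cast; omega) hval
      rw [show ((acc, s).1, (acc, s).2 + x) = (acc, s + x) from rfl, this]
      have : pvF num.toNat c s (x :: xs) = pvF num.toNat (c - 1) (s + x) xs := by
        simp [pvF, hce]
      rw [this]

-- ===== VERDICT (by name: the statement is the Claim_ definition above) =====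
theorem chunk_eq_map (n : Nat) (hn : 0 < n) (xs : List Int) :
    pvChunkSums n xs
      = (List.range (xs.length / n)).map (fun k => ((xs.drop (n * k)).take n).sum) := by
  have key : ∀ (m : Nat) (ys : List Int), ys.length ≤ m →
      pvChunkSums n ys
        = (List.range (ys.length / n)).map (fun k => ((ys.drop (n * k)).take n).sum) := by
    intro m
    induction m with
    | zero =>
      intro ys hy
      have : ys = [] := List.eq_nil_of_length_eq_zero (by omega)
      subst this
      rw [pvChunkSums, dif_pos (Or.inr (by simpa using hn))]
      simp
    | succ m ih =>
      intro ys hy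
      by_cases hlt : ys.length < n
      · rw [pvChunkSums, dif_pos (Or.inr hlt), Nat.div_eq_of_lt hlt]
        simp
      · have hge : n ≤ ys.length := by omega
        rw [pvChunkSums, dif_neg (by omega)]
        have ihd := ih (ys.drop n) (by simp only [List.length_drop]; omega)
        rw [ihd, List.length_drop,
            show ys.length / n = (ys.length - n) / n + 1 from Nat.div_eq_sub_div hn hge,
            List.range_succ_eq_map, List.map_cons, List.map_map]
        refine congrArg₂ List.cons (by simp) ?_
        refine List.map_congr_left (fun k _ => ?_)
        simp only [Function.comp_apply, List.drop_drop]
        rw [show n + n * k = n * (k + 1) by ring]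
  exact key xs.length xs le_rfl

theorem alt_eq_chunk (num : Int) (h1 : 1 ≤ num) (xs : List Int) :
    sum_by_alt xs num = pvChunkSums num.toNat xs := by
  unfold sum_by_alt
  rw [if_neg (by omega), PySem.List.pyRange_of_pos 0 ((xs.length : Int) - num + 1) (by omega),
      List.map_map, chunk_eq_map num.toNat (by omega) xs]
  have hcast : ((num.toNat : Nat) : Int) = num := by omega
  have hcount : (if (0:Int) < (xs.length : Int) - num + 1
        then (((xs.length : Int) - num + 1 - 0 + num - 1) / num).toNat else 0)
      = xs.length / num.toNat := by
    by_cases h : (0:Int) < (xs.length : Int) - num + 1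
    · have hE : ((xs.length / num.toNat : Nat) : Int)
          = ((xs.length : Nat) : Int) / ((num.toNat : Nat) : Int) := by push_cast; ring
      rw [if_pos h, show (xs.length : Int) - num + 1 - 0 + num - 1 = (xs.length : Int) by ring,
          show (xs.length : Int) / num = ((xs.length / num.toNat : Nat) : Int) by rw [hE, hcast]]
      exact Int.toNat_natCast _
    · rw [if_neg h]
      exact (Nat.div_eq_of_lt (by omega)).symm
  rw [hcount]
  refine List.map_congr_left (fun k _ => ?_)
  simp only [Function.comp_apply]
  rw [show (0:Int) + num * (k : Int) = ((num.toNat * k : Nat) : Int) by rw [Nat.cast_mul, hcast]; ring,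
      show ((num.toNat * k : Nat) : Int) + num = ((num.toNat * k : Nat) : Int) + ((num.toNat : Nat) : Int) by rw [hcast],
      PySem.List.slice_natCast_add]

theorem alt_nil (num : Int) : sum_by_alt [] num = [] := by
  unfold sum_by_alt
  by_cases h : num ≤ 0
  · rw [if_pos h]
  · rw [if_neg h, PySem.List.pyRange_of_pos _ _ (by omega : (0:Int) < num),
        if_neg (by simp only [List.length_nil]; omega)]
    simp

-- ===== VERDICT (by name: the statement is the Claim_ definition above) =====
theorem sum_by_spec : Claim_equal_sum_by := by
  intro collection num _ hpre
  unfold Spec_sum_by sum_by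
  rcases hpre with h1 | hnil
  · have hmod0 : (0:Int) % num = num - (num.toNat : Int) := by
      simp [Int.toNat_of_nonneg (by omega : (0:Int) ≤ num)]
    rw [foldA_eq_pvF num h1 collection num.toNat 0 [] 0 (by omega)
        (by simp [Int.toNat_of_nonneg (by omega : (0:Int) ≤ num)]) hmod0,
      pvF_eq_chunkSums num.toNat (by omega) collection,
      ← alt_eq_chunk num h1 collection]
    simp
  · subst hnil
    rw [alt_nil]
    simp [PySem.List.enumerate]
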